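-- pv_equiv track=rewrite | github.com/kbplants/WINTR | locate_hotspots/identify_snp_hotspot_groups.py | union_find_cluster
-- ===== SOURCE A (Python) =====
-- from collections import defaultdict
--
-- def union_find_cluster(positions, max_dist_bp):
--     if len(positions) == 0:
--         return []
--     positions = sorted(positions)
--     parent = {p: p for p in positions}
--
--     def find(x):
--         if parent[x] != x:
--             parent[x] = find(parent[x])
--         return parent[x]
--
--     def union(x, y):
--         px, py = find(x), find(y)
--         if px != py:
--             parent[px] = py
--
--     for i, p in enumerate(positions):
--         for j in range(i + 1, len(positions)):
--             q = positions[j]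
--             if q - p > max_dist_bp:
--                 break
--             union(p, q)
--
--     clusters = defaultdict(list)
--     for p in positions:
--         clusters[find(p)].append(p)
--     return list(clusters.values())
-- ===== SOURCE B (Python) =====
-- def union_find_cluster(positions, max_dist_bp):
--     ps = sorted(positions)
--     groups = []
--     cur = []
--     for q in ps:
--         if cur and q != cur[-1] and q - cur[-1] > max_dist_bp:
--             groups.append(cur)
--             cur = []
--         cur.append(q)
--     if cur:
--         groups.append(cur)
--     return groups
-- ===== Notes on version B (the rewrite author's own statement) =====
-- stated objective: faster
-- what changed: Replaces A's union-find with quadratic pairwise unions (plus a final find pass over a parent dict) by one linear scan of the sorted positions that starts a new cluster exactly at gaps > max_dist_bp between distinct neighbours (identical positions always stay together).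
import Mathlib
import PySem

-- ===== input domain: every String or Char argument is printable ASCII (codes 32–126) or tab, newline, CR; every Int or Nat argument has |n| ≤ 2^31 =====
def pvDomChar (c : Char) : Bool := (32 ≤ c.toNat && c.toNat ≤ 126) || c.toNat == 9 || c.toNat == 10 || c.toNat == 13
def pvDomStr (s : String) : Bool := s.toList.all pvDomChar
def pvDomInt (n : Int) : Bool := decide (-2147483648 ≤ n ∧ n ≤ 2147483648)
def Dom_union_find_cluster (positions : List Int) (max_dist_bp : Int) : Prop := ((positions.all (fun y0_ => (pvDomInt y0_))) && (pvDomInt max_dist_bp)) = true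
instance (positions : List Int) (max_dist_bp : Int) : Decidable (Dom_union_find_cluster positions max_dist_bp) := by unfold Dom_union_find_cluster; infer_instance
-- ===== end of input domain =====

-- B replaces A's quadratic pairwise union-find clustering of the sorted positions by a single
-- linear pass that starts a new cluster exactly at a gap > max_dist_bp between distinct neighbours
-- (objective: faster).

-- ===== PORT A =====
-- find(x) with path compression; the fuel (= length of the position list) strictly exceeds the
-- length of any parent chain (chains strictly increase inside the key set), so the 0-fuel branch
-- is never reached on the states the port builds. parent[x] is read with PySem.Dict.getD x x:
-- every key the Python looks up is present, so KeyError cannot occur.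
def pvFind : Nat → PySem.Dict Int Int → Int → (PySem.Dict Int Int × Int)
  | 0, d, x => (d, x)
  | n+1, d, x =>
      if d.getD x x ≠ x then
        let r := pvFind n d (d.getD x x)
        (r.1.insert x r.2, r.2)
      else (d, x)

def pvUnion (fuel : Nat) (d : PySem.Dict Int Int) (x y : Int) : PySem.Dict Int Int :=
  let r1 := pvFind fuel d x
  let r2 := pvFind fuel r1.1 y
  if r1.2 ≠ r2.2 then r2.1.insert r1.2 r2.2 else r2.1

-- the inner 'for j in range(i+1, len(positions))' with its break, over the list suffix after i
def pvInner (fuel : Nat) (M p : Int) : PySem.Dict Int Int → List Int → PySem.Dict Int Int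
  | d, [] => d
  | d, q :: rest => if q - p > M then d else pvInner fuel M p (pvUnion fuel d p q) rest

-- the outer 'for i, p in enumerate(positions)'
def pvOuter (fuel : Nat) (M : Int) : PySem.Dict Int Int → List Int → PySem.Dict Int Int
  | d, [] => d
  | d, p :: rest => pvOuter fuel M (pvInner fuel M p d rest) rest

def union_find_cluster (positions : List Int) (max_dist_bp : Int) : List (List Int) :=
  if positions.length = 0 then [] else
  let ps := PySem.List.sorted positions (fun x => x) false
  let parent0 := ps.foldl (fun d p => d.insert p p) PySem.Dict.empty
  let fuel := ps.length
  let parent1 := pvOuter fuel max_dist_bp parent0 ps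
  let clusters := ps.foldl
    (fun (acc : PySem.Dict Int (List Int) × PySem.Dict Int Int) p =>
      let r := pvFind fuel acc.2 p
      (acc.1.modify r.2 [] (fun l => l ++ [p]), r.1))
    (PySem.Dict.empty, parent1)
  clusters.1.values

-- ===== PORT B =====
def union_find_cluster_alt (positions : List Int) (max_dist_bp : Int) : List (List Int) :=
  let ps := PySem.List.sorted positions (fun x => x) false
  let acc := ps.foldl
    (fun (acc : List (List Int) × List Int) q =>
      match acc.2.getLast? with
      | some last =>
        if q ≠ last ∧ q - last > max_dist_bp then (acc.1 ++ [acc.2], [q]) else (acc.1, acc.2 ++ [q])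
      | none => (acc.1, [q]))
    ([], [])
  if acc.2 ≠ [] then acc.1 ++ [acc.2] else acc.1

-- ===== PRECONDITION & SPEC =====
def Spec_union_find_cluster (positions : List Int) (max_dist_bp : Int) (out : List (List Int)) : Prop := out = union_find_cluster_alt positions max_dist_bp
instance (positions : List Int) (max_dist_bp : Int) (out : List (List Int)) : Decidable (Spec_union_find_cluster positions max_dist_bp out) := by unfold Spec_union_find_cluster; infer_instance

-- ===== CLAIM (what is proved, stated in full; the proofs are below) =====
def Claim_equal_union_find_cluster : Prop := ∀ (positions : List Int) (max_dist_bp : Int), Dom_union_find_cluster positions max_dist_bp → Spec_union_find_cluster positions max_dist_bp (union_find_cluster positions max_dist_bp)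

-- ===== LEMMAS AND PROOFS =====

def pvConsec (S : List Int) (a b : Int) : Prop :=
  a ∈ S ∧ b ∈ S ∧ a < b ∧ ∀ c ∈ S, ¬(a < c ∧ c < b)

structure pvGood (S : List Int) (M : Int) (ρ : Int → Int) (d : PySem.Dict Int Int) : Prop where
  g1 : ∀ x ∈ S, d.getD x x ∈ S
  g2 : ∀ x ∈ S, x ≤ d.getD x x ∧ d.getD x x ≤ ρ x
  g3 : ∀ x ∈ S, d.getD x x = x → ρ x = x
  g4 : ∀ x ∈ S, ρ (d.getD x x) = ρ x
  r1 : ∀ x ∈ S, ρ x ∈ S ∧ x ≤ ρ x ∧ ρ (ρ x) = ρ x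
  r2 : ∀ x ∈ S, ∀ y ∈ S, x ≤ y → y ≤ ρ x → ρ y = ρ x
  r3 : ∀ x ∈ S, ∀ a b, pvConsec S a b → x ≤ a → b ≤ ρ x → b - a ≤ M

lemma pvFuelOk (S : List Int) (x : Int) (hx : x ∈ S) :
    ((PySem.List.dedup S).filter (fun c => decide (x < c))).length < S.length := by
  have h1 : ((PySem.List.dedup S).filter (fun c => decide (x < c))).length < (PySem.List.dedup S).length := by
    rw [List.length_filter_lt_length_iff_exists]
    exact ⟨x, by simpa [PySem.List.mem_dedup] using hx, by simp⟩
  have h2 : (PySem.List.dedup S).length ≤ S.length := by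
    rw [PySem.List.dedup_eq_ofList]
    exact PySem.Set.length_ofList_le S
  omega

lemma pvFind_spec (S : List Int) (M : Int) (ρ : Int → Int) :
    ∀ (fuel : Nat) (d : PySem.Dict Int Int) (x : Int), pvGood S M ρ d → x ∈ S →
    ((PySem.List.dedup S).filter (fun c => decide (x < c))).length < fuel →
    (pvFind fuel d x).2 = ρ x ∧ pvGood S M ρ (pvFind fuel d x).1 := by
  intro fuel
  induction fuel with
  | zero => intro d x hG hx hf; omega
  | succ n ih =>
    intro d x hG hx hf
    by_cases hne : d.getD x x = x
    · simp only [pvFind, hne, ne_eq, not_true_eq_false, if_false]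
      exact ⟨(hG.g3 x hx hne).symm, hG⟩
    · have hx' : d.getD x x ∈ S := hG.g1 x hx
      have hlt : x < d.getD x x := lt_of_le_of_ne (hG.g2 x hx).1 (Ne.symm hne)
      have hmono : (PySem.List.dedup S).filter (fun c => decide (d.getD x x < c))
          = ((PySem.List.dedup S).filter (fun c => decide (x < c))).filter
              (fun c => decide (d.getD x x < c)) := by
        rw [List.filter_filter]
        apply List.filter_congr
        intro a _
        by_cases h : d.getD x x < a
        · have : x < a := by omega
          simp [h, this]
        · simp [h]
      have hstrict : ((PySem.List.dedup S).filter (fun c => decide (d.getD x x < c))).length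
          < ((PySem.List.dedup S).filter (fun c => decide (x < c))).length := by
        rw [hmono, List.length_filter_lt_length_iff_exists]
        refine ⟨d.getD x x, ?_, by simp⟩
        simp only [List.mem_filter]
        exact ⟨by simpa [PySem.List.mem_dedup] using hx', by simpa using hlt⟩
      have ih' := ih d (d.getD x x) hG hx' (by omega)
      simp only [pvFind, hne, ne_eq, not_false_eq_true, if_true]
      refine ⟨?_, ?_⟩
      · show (pvFind n d (d.getD x x)).2 = ρ x
        rw [ih'.1]; exact hG.g4 x hx
      · have hGr := ih'.2
        have hval : (pvFind n d (d.getD x x)).2 = ρ x := by rw [ih'.1]; exact hG.g4 x hx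
        show pvGood S M ρ ((pvFind n d (d.getD x x)).1.insert x (pvFind n d (d.getD x x)).2)
        rw [hval]
        constructor
        next =>
          intro y hy
          rw [PySem.Dict.getD_insert]
          split
          · exact (hG.r1 x hx).1
          · exact hGr.g1 y hy
        next =>
          intro y hy
          rw [PySem.Dict.getD_insert]
          split
          next h => subst h; exact ⟨(hG.r1 y hy).2.1, le_refl _⟩
          next h => exact hGr.g2 y hy
        next =>
          intro y hy
          rw [PySem.Dict.getD_insert]
          split
          next h => subst h; intro h2; simp [h2]
          next h => exact hGr.g3 y hy
        next =>
          intro y hy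
          rw [PySem.Dict.getD_insert]
          split
          next h => subst h; exact (hG.r1 y hy).2.2
          next h => exact hGr.g4 y hy
        next => exact hGr.r1
        next => exact hGr.r2
        next => exact hGr.r3


def pvExtends (ρ ρ' : Int → Int) : Prop := ∀ a b, ρ a = ρ b → ρ' a = ρ' b

lemma pvUnion_spec (S : List Int) (M : Int) (ρ : Int → Int) (fuel : Nat)
    (d : PySem.Dict Int Int) (p q : Int) (hG : pvGood S M ρ d)
    (hp : p ∈ S) (hq : q ∈ S) (hpq : p ≤ q) (hgap : q - p ≤ M)
    (hfuel : ∀ x ∈ S, ((PySem.List.dedup S).filter (fun c => decide (x < c))).length < fuel)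
    (hcov : ∀ v ∈ S, p ≤ v → v < q → ρ v = ρ p) :
    ∃ ρ', pvGood S M ρ' (pvUnion fuel d p q) ∧ pvExtends ρ ρ' ∧ ρ' p = ρ' q := by
  obtain ⟨h1v, h1G⟩ := pvFind_spec S M ρ fuel d p hG hp (hfuel p hp)
  obtain ⟨h2v, h2G⟩ := pvFind_spec S M ρ fuel (pvFind fuel d p).1 q h1G hq (hfuel q hq)
  show ∃ ρ', pvGood S M ρ'
      (if (pvFind fuel d p).2 ≠ (pvFind fuel (pvFind fuel d p).1 q).2 then
        (pvFind fuel (pvFind fuel d p).1 q).1.insert (pvFind fuel d p).2 (pvFind fuel (pvFind fuel d p).1 q).2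
      else (pvFind fuel (pvFind fuel d p).1 q).1) ∧ pvExtends ρ ρ' ∧ ρ' p = ρ' q
  rw [h1v, h2v]
  by_cases heq : ρ p = ρ q
  · simp only [heq, ne_eq, not_true_eq_false, if_false]
    exact ⟨ρ, h2G, fun a b h => h, heq⟩
  · simp only [ne_eq, heq, not_false_eq_true, if_true]
    have hPS : ρ p ∈ S := (hG.r1 p hp).1
    have hQS : ρ q ∈ S := (hG.r1 q hq).1
    have hpρ : p ≤ ρ p := (hG.r1 p hp).2.1
    have hqρ : q ≤ ρ q := (hG.r1 q hq).2.1
    have hρρp : ρ (ρ p) = ρ p := (hG.r1 p hp).2.2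
    have hρρq : ρ (ρ q) = ρ q := (hG.r1 q hq).2.2
    have hPltq : ρ p < q := by
      by_contra h
      exact heq (hG.r2 p hp q hq hpq (by omega)).symm
    have hPQ : ρ p < ρ q := by omega
    refine ⟨fun z => if ρ z = ρ p then ρ q else ρ z, ?_, ?_, ?_⟩
    · constructor
      · -- g1
        intro y hy
        rw [PySem.Dict.getD_insert]
        split
        · exact hQS
        · exact h2G.g1 y hy
      · -- g2
        intro y hy
        rw [PySem.Dict.getD_insert]
        split
        next h =>
          subst h
          rw [hρρp]
          constructor
          · omega
          · split <;> omega
        next h =>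
          have := h2G.g2 y hy
          split
          next hc => omega
          next hc => exact this
      · -- g3
        intro y hy
        rw [PySem.Dict.getD_insert]
        split
        next h => subst h; omega
        next h =>
          intro h2
          have hyy := h2G.g3 y hy h2
          rw [if_neg (by rw [hyy]; exact fun hc => h (by omega))]
          exact hyy
      · -- g4
        intro y hy
        rw [PySem.Dict.getD_insert]
        split
        next h =>
          subst h
          rw [hρρp, hρρq]
          split <;> split <;> omega
        next h =>
          have h4 := h2G.g4 y hy
          simp only [h4]
      · -- r1
        intro y hy
        refine ⟨?_, ?_, ?_⟩
        · split
          · exact hQS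
          · exact (hG.r1 y hy).1
        · have := (hG.r1 y hy).2.1
          split
          next hc => omega
          next hc => omega
        · split
          next hc =>
            rw [hρρq]
            split <;> omega
          next hc =>
            rw [(hG.r1 y hy).2.2, if_neg hc]
      · -- r2
        intro y hy z hz hyz hzρ
        by_cases hyp : ρ y = ρ p
        · rw [if_pos hyp] at hzρ ⊢
          by_cases hzle : z ≤ ρ y
          · have := hG.r2 y hy z hz hyz hzle
            rw [if_pos (by omega)]
          · by_cases hzq : z < q
            · have hpz : p ≤ z := by omega
              have := hcov z hz hpz hzq
              rw [if_pos (by omega)]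
            · have := hG.r2 q hq z hz (by omega) (by omega)
              rw [if_neg (by omega), this]
        · rw [if_neg hyp] at hzρ ⊢
          have := hG.r2 y hy z hz hyz hzρ
          rw [if_neg (by omega), this]
      · -- r3
        intro y hy a b hab hya hbρ
        obtain ⟨haS, hbS, hab3, habc⟩ := hab
        by_cases hyp : ρ y = ρ p
        · rw [if_pos hyp] at hbρ
          by_cases hble : b ≤ ρ y
          · exact hG.r3 y hy a b ⟨haS, hbS, hab3, habc⟩ hya hble
          · by_cases haq : q ≤ a
            · exact hG.r3 q hq a b ⟨haS, hbS, hab3, habc⟩ haq hbρ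
            · by_cases hap : p ≤ a
              · have hbq : b ≤ q := by
                  by_contra hc
                  exact habc q hq ⟨by omega, by omega⟩
                omega
              · have hbp : b ≤ p := by
                  by_contra hc
                  exact habc p hp ⟨by omega, by omega⟩
                omega
        · rw [if_neg hyp] at hbρ
          exact hG.r3 y hy a b ⟨haS, hbS, hab3, habc⟩ hya hbρ
    · intro a b h
      simp only [h]
    · show (if ρ p = ρ p then ρ q else ρ p) = (if ρ q = ρ p then ρ q else ρ q)
      split <;> split <;> omega


lemma pvInner_spec (S : List Int) (M : Int) (fuel : Nat) (p : Int)
    (hS : S.Pairwise (· ≤ ·))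
    (hfuel : ∀ x ∈ S, ((PySem.List.dedup S).filter (fun c => decide (x < c))).length < fuel) :
    ∀ (todo : List Int) (d : PySem.Dict Int Int) (ρ : Int → Int), pvGood S M ρ d →
    (∃ u, S = u ++ todo ∧ p ∈ u) →
    (∀ v ∈ S, p ≤ v → (∀ w ∈ todo, v < w) → ρ v = ρ p) →
    ∃ ρ', pvGood S M ρ' (pvInner fuel M p d todo) ∧ pvExtends ρ ρ' ∧
      (∀ v ∈ todo, v - p ≤ M → ρ' v = ρ' p) := by
  intro todo
  induction todo with
  | nil =>
    intro d ρ hG _ _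
    exact ⟨ρ, hG, fun a b h => h, by simp⟩
  | cons q rest ih =>
    intro d ρ hG hdec hcov
    obtain ⟨u, hSu, hpu⟩ := hdec
    have hpw := List.pairwise_append.mp (hSu ▸ hS)
    have hp : p ∈ S := by rw [hSu]; exact List.mem_append_left _ hpu
    have hq : q ∈ S := by rw [hSu]; exact List.mem_append_right _ (by simp)
    have hpq : p ≤ q := hpw.2.2 p hpu q (by simp)
    have hqrest : ∀ w ∈ rest, q ≤ w := by
      intro w hw
      exact List.rel_of_pairwise_cons hpw.2.1 hw
    by_cases hbr : q - p > M
    · refine ⟨ρ, by simpa [pvInner, hbr] using hG, fun a b h => h, ?_⟩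
      intro v hv hvM
      rcases List.mem_cons.mp hv with rfl | hv'
      · omega
      · have := hqrest v hv'
        omega
    · have hcov' : ∀ v ∈ S, p ≤ v → v < q → ρ v = ρ p := by
        intro v hv hpv hvq
        refine hcov v hv hpv ?_
        intro w hw
        rcases List.mem_cons.mp hw with rfl | hw'
        · exact hvq
        · have := hqrest w hw'; omega
      obtain ⟨ρ1, hG1, hext1, hpq1⟩ :=
        pvUnion_spec S M ρ fuel d p q hG hp hq hpq (by omega) hfuel hcov'
      have hcov1 : ∀ v ∈ S, p ≤ v → (∀ w ∈ rest, v < w) → ρ1 v = ρ1 p := by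
        intro v hv hpv hvw
        by_cases hvq : v < q
        · refine hext1 v p (hcov v hv hpv ?_)
          intro w hw
          rcases List.mem_cons.mp hw with rfl | hw'
          · exact hvq
          · exact hvw w hw'
        · have hvq2 : v = q := by
            rw [hSu] at hv
            rcases List.mem_append.mp hv with hvu | hvr
            · have := hpw.2.2 v hvu q (by simp); omega
            · rcases List.mem_cons.mp hvr with rfl | hvr'
              · rfl
              · exact absurd (hvw v hvr') (by omega)
          rw [hvq2]
          exact hpq1.symm
      obtain ⟨ρ', hG', hext2, hprop⟩ := ih (pvUnion fuel d p q) ρ1 hG1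
        ⟨u ++ [q], by simp [hSu], List.mem_append_left _ hpu⟩ hcov1
      refine ⟨ρ', by simpa [pvInner, hbr] using hG', fun a b h => hext2 a b (hext1 a b h), ?_⟩
      intro v hv hvM
      rcases List.mem_cons.mp hv with rfl | hv'
      · exact hext2 v p hpq1.symm
      · exact hprop v hv' hvM


lemma pvOuter_spec (S : List Int) (M : Int) (fuel : Nat)
    (hS : S.Pairwise (· ≤ ·))
    (hfuel : ∀ x ∈ S, ((PySem.List.dedup S).filter (fun c => decide (x < c))).length < fuel) :
    ∀ (todo : List Int) (d : PySem.Dict Int Int) (ρ : Int → Int), pvGood S M ρ d →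
    (∃ u, S = u ++ todo) →
    ∃ ρ', pvGood S M ρ' (pvOuter fuel M d todo) ∧ pvExtends ρ ρ' ∧
      (∀ p r, (∃ u', todo = u' ++ p :: r) → ∀ v ∈ r, v - p ≤ M → ρ' v = ρ' p) := by
  intro todo
  induction todo with
  | nil =>
    intro d ρ hG _
    refine ⟨ρ, hG, fun a b h => h, ?_⟩
    rintro p r ⟨u', hu'⟩
    exact absurd hu' (by simp)
  | cons p rest ih =>
    intro d ρ hG hdec
    obtain ⟨u, hSu⟩ := hdec
    have hpw := List.pairwise_append.mp (hSu ▸ hS)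
    have hpu : p ∈ u ++ [p] := List.mem_append_right _ (by simp)
    have hcovinit : ∀ v ∈ S, p ≤ v → (∀ w ∈ rest, v < w) → ρ v = ρ p := by
      intro v hv hpv hvw
      have hvp : v = p := by
        rw [hSu] at hv
        rcases List.mem_append.mp hv with hvu | hvr
        · have := hpw.2.2 v hvu p (by simp); omega
        · rcases List.mem_cons.mp hvr with rfl | hvr'
          · rfl
          · exact absurd (hvw v hvr') (by omega)
      rw [hvp]
    obtain ⟨ρ1, hG1, hext1, hprop1⟩ := pvInner_spec S M fuel p hS hfuel rest d ρ hG
      ⟨u ++ [p], by simp [hSu], hpu⟩ hcovinit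
    obtain ⟨ρ', hG', hext2, hprop2⟩ := ih (pvInner fuel M p d rest) ρ1 hG1
      ⟨u ++ [p], by simp [hSu]⟩
    refine ⟨ρ', hG', fun a b h => hext2 a b (hext1 a b h), ?_⟩
    rintro p' r ⟨u', hu'⟩ v hv hvM
    rcases u' with _ | ⟨x, u''⟩
    · simp at hu'
      obtain ⟨rfl, rfl⟩ := hu'
      exact hext2 v _ (hprop1 v hv hvM)
    · simp at hu'
      exact hprop2 p' r ⟨u'', hu'.2⟩ v hv hvM

lemma pvInit_getD (l : List Int) :
    ∀ (d : PySem.Dict Int Int), (∀ y, d.getD y y = y) →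
    ∀ x, (l.foldl (fun d p => d.insert p p) d).getD x x = x := by
  induction l with
  | nil => intro d hd x; exact hd x
  | cons p rest ih =>
    intro d hd x
    refine ih (d.insert p p) ?_ x
    intro y
    rw [PySem.Dict.getD_insert]
    split
    next h => exact h.symm
    next h => exact hd y

lemma pvGood_init (S : List Int) (M : Int)
    (hd : ∀ x, (S.foldl (fun d p => d.insert p p) PySem.Dict.empty).getD x x = x) :
    pvGood S M (fun x => x) (S.foldl (fun d p => d.insert p p) PySem.Dict.empty) := by
  constructor
  · intro x hx; rw [hd]; exact hx
  · intro x hx; rw [hd]; omega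
  · intro x hx _; rfl
  · intro x hx; rw [hd]
  · intro x hx; exact ⟨hx, le_refl x, rfl⟩
  · intro x hx y hy h1 h2; omega
  · intro x hx a b hab h1 h2
    obtain ⟨_, _, h3, _⟩ := hab
    omega

lemma pvCluster_fold (S : List Int) (M : Int) (ρ : Int → Int) (fuel : Nat)
    (hfuel : ∀ x ∈ S, ((PySem.List.dedup S).filter (fun c => decide (x < c))).length < fuel) :
    ∀ (l : List Int) (c : PySem.Dict Int (List Int)) (d : PySem.Dict Int Int),
    pvGood S M ρ d → (∀ x ∈ l, x ∈ S) →
    (l.foldl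
      (fun (acc : PySem.Dict Int (List Int) × PySem.Dict Int Int) p =>
        let r := pvFind fuel acc.2 p
        (acc.1.modify r.2 [] (fun l => l ++ [p]), r.1)) (c, d)).1
      = l.foldl (fun c p => c.modify (ρ p) [] (fun l => l ++ [p])) c := by
  intro l
  induction l with
  | nil => intro c d hG hl; rfl
  | cons p rest ih =>
    intro c d hG hl
    have hp : p ∈ S := hl p (by simp)
    obtain ⟨hv, hG'⟩ := pvFind_spec S M ρ fuel d p hG hp (hfuel p hp)
    simp only [List.foldl_cons, hv]
    exact ih _ _ hG' (fun x hx => hl x (by simp [hx]))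

def pvSplit (M : Int) : List Int → List Int → List (List Int)
  | cur, [] => [cur]
  | cur, q :: rest =>
    if q ≠ cur.getLastD 0 ∧ q - cur.getLastD 0 > M then cur :: pvSplit M [q] rest
    else pvSplit M (cur ++ [q]) rest

lemma pvBfold (M : Int) : ∀ (l : List Int) (groups : List (List Int)) (cur : List Int), cur ≠ [] →
    (let r := l.foldl (fun (acc : List (List Int) × List Int) q =>
      match acc.2.getLast? with
      | some last =>
        if q ≠ last ∧ q - last > M then (acc.1 ++ [acc.2], [q]) else (acc.1, acc.2 ++ [q])
      | none => (acc.1, [q])) (groups, cur);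
     if r.2 ≠ [] then r.1 ++ [r.2] else r.1) = groups ++ pvSplit M cur l := by
  intro l
  induction l with
  | nil => intro groups cur hc; simp [pvSplit, hc]
  | cons q rest ih =>
    intro groups cur hc
    obtain ⟨w, x, rfl⟩ : ∃ w x, cur = w ++ [x] := by
      rcases List.eq_nil_or_concat cur with rfl | ⟨w, x, h⟩
      · exact absurd rfl hc
      · exact ⟨w, x, by simpa using h⟩
    have hx : (w ++ [x]).getLast? = some x := by simp
    have hxd : (w ++ [x]).getLastD 0 = x := by simp
    simp only [List.foldl_cons, hx]
    by_cases hcond : q ≠ x ∧ q - x > M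
    · rw [if_pos hcond]
      have := ih (groups ++ [w ++ [x]]) [q] (by simp)
      simp only [] at this ⊢
      rw [this]
      simp only [pvSplit, hxd]
      rw [if_pos (by exact hcond)]
      simp
    · rw [if_neg hcond]
      have := ih groups ((w ++ [x]) ++ [q]) (by simp)
      simp only [] at this ⊢
      rw [this]
      simp only [pvSplit, hxd]
      rw [if_neg (by exact hcond)]

def pvBnd (M : Int) (g h : List Int) : Prop :=
  ∃ w1 a b w2, g = w1 ++ [a] ∧ h = b :: w2 ∧ a < b ∧ b - a > M

lemma pvSplit_spec (M : Int) : ∀ (l cur : List Int), cur ≠ [] →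
    (cur ++ l).Pairwise (· ≤ ·) →
    (∀ u1 a b w1, cur = u1 ++ a :: b :: w1 → a = b ∨ b - a ≤ M) →
    ((pvSplit M cur l).flatten = cur ++ l) ∧
    (∀ g ∈ pvSplit M cur l, g ≠ []) ∧
    (∃ t gs', pvSplit M cur l = (cur ++ t) :: gs') ∧
    (∀ g ∈ pvSplit M cur l, ∀ u1 a b w1, g = u1 ++ a :: b :: w1 → a = b ∨ b - a ≤ M) ∧
    List.IsChain (pvBnd M) (pvSplit M cur l) := by
  intro l
  induction l with
  | nil =>
    intro cur hc hpw h3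
    refine ⟨by simp [pvSplit], by simp [pvSplit, hc], ⟨[], [], by simp [pvSplit]⟩, ?_,
      by rw [show pvSplit M cur [] = [cur] from rfl]; exact List.IsChain.singleton _⟩
    intro g hg
    simp only [pvSplit, List.mem_singleton] at hg
    subst hg
    exact h3
  | cons q rest ih =>
    intro cur hc hpw h3
    obtain ⟨w, x, rfl⟩ : ∃ w x, cur = w ++ [x] := by
      rcases List.eq_nil_or_concat cur with rfl | ⟨w, x, h⟩
      · exact absurd rfl hc
      · exact ⟨w, x, by simpa using h⟩
    have hxd : (w ++ [x]).getLastD 0 = x := by simp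
    have hxq : x ≤ q := by
      have := List.pairwise_append.mp hpw
      exact this.2.2 x (by simp) q (by simp)
    by_cases hcond : q ≠ x ∧ q - x > M
    · have hsplit : pvSplit M (w ++ [x]) (q :: rest) = (w ++ [x]) :: pvSplit M [q] rest := by
        simp only [pvSplit, hxd]
        rw [if_pos (by exact hcond)]
      have hpw' : ([q] ++ rest).Pairwise (· ≤ ·) := by
        have := List.pairwise_append.mp hpw
        simpa using this.2.1
      have h3' : ∀ u1 a b w1, [q] = u1 ++ a :: b :: w1 → a = b ∨ b - a ≤ M := by
        intro u1 a b w1 h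
        rcases u1 with _ | ⟨y, u1'⟩ <;> simp_all
      obtain ⟨f1, f2, ⟨t, gs', hf5⟩, f3, f4⟩ := ih [q] (by simp) hpw' h3'
      rw [hsplit]
      refine ⟨by simp [f1], ?_, ⟨[], pvSplit M [q] rest, by simp⟩, ?_, ?_⟩
      · intro g hg
        rcases List.mem_cons.mp hg with rfl | hg'
        · simp
        · exact f2 g hg'
      · intro g hg
        rcases List.mem_cons.mp hg with rfl | hg'
        · exact h3
        · exact f3 g hg'
      · rw [List.isChain_cons]
        refine ⟨?_, f4⟩
        intro y hy
        rw [hf5] at hy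
        simp only [List.head?_cons, Option.mem_def, Option.some.injEq] at hy
        subst hy
        exact ⟨w, x, q, t, rfl, rfl, by omega, hcond.2⟩
    · have hsplit : pvSplit M (w ++ [x]) (q :: rest) = pvSplit M ((w ++ [x]) ++ [q]) rest := by
        simp only [pvSplit, hxd]
        rw [if_neg (by exact hcond)]
      have hpw' : (((w ++ [x]) ++ [q]) ++ rest).Pairwise (· ≤ ·) := by
        simpa using hpw
      have h3' : ∀ u1 a b w1, (w ++ [x]) ++ [q] = u1 ++ a :: b :: w1 → a = b ∨ b - a ≤ M := by
        intro u1 a b w1 h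
        rcases List.eq_nil_or_concat w1 with rfl | ⟨w1', y, hw1⟩
        · have h' : (u1 ++ [a]) ++ [b] = (w ++ [x]) ++ [q] := by simpa using h.symm
          obtain ⟨h1, h2⟩ := List.append_inj' h' (by simp)
          have hbq : b = q := by simpa using h2
          have hax : a = x := by
            have : (u1 ++ [a]).getLastD 0 = ((w ++ [x]) : List Int).getLastD 0 := by rw [h1]
            simpa using this
          subst hbq; subst hax
          omega
        · subst hw1
          have h' : (u1 ++ a :: b :: w1') ++ [y] = (w ++ [x]) ++ [q] := by
            simpa using h.symm
          obtain ⟨h1, h2⟩ := List.append_inj' h' (by simp)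
          exact h3 u1 a b w1' h1.symm
      obtain ⟨f1, f2, ⟨t, gs', hf5⟩, f3, f4⟩ := ih ((w ++ [x]) ++ [q]) (by simp) hpw' h3'
      rw [hsplit]
      refine ⟨by simpa using f1, f2, ⟨[q] ++ t, gs', by simpa using hf5⟩, f3, f4⟩

lemma pvConsecOfAdj (S : List Int) (hS : S.Pairwise (· ≤ ·)) (u : List Int) (a b : Int)
    (w : List Int) (hsplit : S = u ++ a :: b :: w) (hab : a < b) : pvConsec S a b := by
  subst hsplit
  have hpa := List.pairwise_append.mp hS
  refine ⟨List.mem_append_right _ (by simp), List.mem_append_right _ (by simp), hab, ?_⟩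
  intro c hc
  rcases List.mem_append.mp hc with hcu | hcr
  · have := hpa.2.2 c hcu a (by simp); omega
  · rcases List.mem_cons.mp hcr with rfl | hcr'
    · omega
    · rcases List.mem_cons.mp hcr' with rfl | hcr''
      · omega
      · have := List.rel_of_pairwise_cons (List.pairwise_cons.mp hpa.2.1).2 hcr''
        omega

-- κ is constant on a list whose list-adjacent elements it identifies
lemma pvConstOnGroup (κ : Int → Int) :
    ∀ (g : List Int) (z : Int),
    (∀ u1 a b w1, (z :: g) = u1 ++ a :: b :: w1 → κ a = κ b) →
    ∀ a ∈ (z :: g), κ a = κ z := by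
  intro g
  induction g with
  | nil => intro z _ a ha; simp at ha; rw [ha]
  | cons y g' ih =>
    intro z hadj a ha
    have hzy : κ z = κ y := hadj [] z y g' rfl
    rcases List.mem_cons.mp ha with rfl | ha'
    · rfl
    · have := ih y (fun u1 a b w1 h => hadj (z :: u1) a b w1 (by simp [h])) a ha'
      rw [this, hzy]

-- a member of a list of lists splits the flattening
lemma pvFlattenSplit {α : Type} (gs : List (List α)) (g : List α) (hg : g ∈ gs) :
    ∃ A B, gs.flatten = A ++ g ++ B := by
  obtain ⟨l1, l2, rfl⟩ := List.append_of_mem hg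
  exact ⟨l1.flatten, l2.flatten, by simp⟩

lemma pvChainR (S : List Int) (M : Int) (κ : Int → Int)
    (hS : S.Pairwise (· ≤ ·))
    (hr1 : ∀ x ∈ S, x ≤ κ x)
    (hr3 : ∀ x ∈ S, ∀ a b, pvConsec S a b → x ≤ a → b ≤ κ x → b - a ≤ M) :
    ∀ (gs : List (List Int)) (A : List Int), A ++ gs.flatten = S →
    List.IsChain (pvBnd M) gs →
    List.IsChain (fun g h => (∃ x, x ∈ h) ∧ ∀ a ∈ g, ∀ b ∈ h, κ a < κ b) gs := by
  intro gs
  induction gs with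
  | nil => intro A _ _; exact List.IsChain.nil
  | cons g t ih =>
    intro A hA hch
    rcases t with _ | ⟨h, t'⟩
    · exact List.IsChain.singleton _
    · rw [List.isChain_cons_cons] at hch ⊢
      obtain ⟨⟨w1, a, b, w2, hg, hh, hab, hgap⟩, hch'⟩ := hch
      have hA' : A ++ (g ++ (h ++ t'.flatten)) = S := by simpa using hA
      have hdecomp : S = (A ++ w1) ++ a :: b :: (w2 ++ t'.flatten) := by
        rw [← hA', hg, hh]
        simp [List.append_assoc]
      constructor
      · refine ⟨⟨b, by simp [hh]⟩, ?_⟩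
        intro a' ha' b' hb'
        have ha'S : a' ∈ S := by rw [← hA']; simp [ha']
        have hb'S : b' ∈ S := by rw [← hA']; simp [hb']
        have hgpw : g.Pairwise (· ≤ ·) := by
          refine List.Pairwise.sublist (List.IsInfix.sublist ⟨A, h ++ t'.flatten, ?_⟩) hS
          rw [← hA']; simp [List.append_assoc]
        have ha'a : a' ≤ a := by
          rw [hg] at ha' hgpw
          rcases List.mem_append.mp ha' with hw | hsing
          · exact (List.pairwise_append.mp hgpw).2.2 a' hw a (by simp)
          · simp at hsing; omega
        have hhpw : h.Pairwise (· ≤ ·) := by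
          refine List.Pairwise.sublist (List.IsInfix.sublist ⟨A ++ g, t'.flatten, ?_⟩) hS
          rw [← hA']; simp [List.append_assoc]
        have hbb' : b ≤ b' := by
          rw [hh] at hb' hhpw
          rcases List.mem_cons.mp hb' with rfl | hw
          · omega
          · exact List.rel_of_pairwise_cons hhpw hw
        have hconsec := pvConsecOfAdj S hS (A ++ w1) a b (w2 ++ t'.flatten) hdecomp hab
        have hka : κ a' < b := by
          by_contra hc
          have := hr3 a' ha'S a b hconsec ha'a (by omega)
          omega
        have := hr1 b' hb'S
        omega
      · exact ih (A ++ g) (by simpa [List.append_assoc] using hA) hch'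

lemma pvOfListConst (c : Int) :
    ∀ (l1 : List Int), l1 ≠ [] → (∀ y ∈ l1, y = c) → PySem.Set.ofList l1 = [c] := by
  intro l1
  induction l1 with
  | nil => intro h _; exact absurd rfl h
  | cons y t ih =>
    intro _ hall
    have hyc : y = c := hall y (by simp)
    subst hyc
    rw [PySem.Set.ofList_cons]
    rcases eq_or_ne t [] with rfl | ht
    · simp
      rw [List.eq_nil_iff_forall_not_mem]
      intro x hx
      have := ((PySem.Set.mem_discard _ _ _).mp hx).1
      simp at this
    · rw [ih ht (fun z hz => hall z (by simp [hz]))]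
      congr 1
      rw [List.eq_nil_iff_forall_not_mem]
      intro x hx
      have h2 := (PySem.Set.mem_discard _ _ _).mp hx
      simp at h2

lemma pvOfListBlock (c : Int) (l1 l2 : List Int) (h1 : l1 ≠ []) (hall : ∀ y ∈ l1, y = c)
    (hc2 : c ∉ l2) : PySem.Set.ofList (l1 ++ l2) = c :: PySem.Set.ofList l2 := by
  rw [PySem.Set.ofList_append, pvOfListConst c l1 h1 hall, PySem.Set.update_eq_append_filter]
  have : (PySem.Set.ofList l2).filter (fun y => !PySem.Set.contains [c] y) = PySem.Set.ofList l2 := by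
    rw [List.filter_eq_self]
    intro y hy
    have hyl2 : y ∈ l2 := (PySem.Set.mem_ofList _ _).mp hy
    have : y ≠ c := fun h => hc2 (h ▸ hyl2)
    simp [PySem.Set.contains_eq_listContains]
    exact this
  rw [this]
  rfl

lemma pvFibers (κ : Int → Int) :
    ∀ (gs : List (List Int)),
    (∀ g ∈ gs, g ≠ []) →
    (∀ g ∈ gs, ∀ a ∈ g, ∀ b ∈ g, κ a = κ b) →
    List.Pairwise (fun g h => ∀ a ∈ g, ∀ b ∈ h, κ a < κ b) gs →
    (PySem.Set.ofList (gs.flatten.map κ)).map (fun c => gs.flatten.filter (fun v => κ v == c)) = gs := by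
  intro gs
  induction gs with
  | nil => intro _ _ _; simp
  | cons g t ih =>
    intro hne hconst hpw
    obtain ⟨g0, g', rfl⟩ := List.exists_cons_of_ne_nil (hne g (by simp))
    obtain ⟨hrel, hpw'⟩ := List.pairwise_cons.mp hpw
    have hgconst : ∀ a ∈ (g0 :: g'), κ a = κ g0 :=
      fun a ha => hconst (g0 :: g') (by simp) a ha g0 (by simp)
    have hcnot : κ g0 ∉ (t.flatten.map κ) := by
      intro hc
      obtain ⟨v, hv, hkv⟩ := List.mem_map.mp hc
      obtain ⟨h, hh, hvh⟩ := List.mem_flatten.mp hv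
      have := hrel h hh g0 (by simp) v hvh
      omega
    have hblock : PySem.Set.ofList (((g0 :: g') ++ t.flatten).map κ)
        = κ g0 :: PySem.Set.ofList (t.flatten.map κ) := by
      rw [List.map_append]
      refine pvOfListBlock (κ g0) _ _ (by simp) ?_ hcnot
      intro y hy
      obtain ⟨a, ha, rfl⟩ := List.mem_map.mp hy
      exact hgconst a ha
    rw [List.flatten_cons, hblock, List.map_cons]
    have hfiber0 : ((g0 :: g') ++ t.flatten).filter (fun v => κ v == κ g0) = g0 :: g' := by
      rw [List.filter_append]
      have h1 : (g0 :: g').filter (fun v => κ v == κ g0) = g0 :: g' := by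
        rw [List.filter_eq_self]
        intro a ha
        simp [hgconst a ha]
      have h2 : t.flatten.filter (fun v => κ v == κ g0) = [] := by
        rw [List.filter_eq_nil_iff]
        intro v hv
        obtain ⟨h, hh, hvh⟩ := List.mem_flatten.mp hv
        have := hrel h hh g0 (by simp) v hvh
        simp
        omega
      rw [h1, h2, List.append_nil]
    rw [hfiber0]
    congr 1
    have hmapc : (PySem.Set.ofList (t.flatten.map κ)).map
          (fun c => ((g0 :: g') ++ t.flatten).filter (fun v => κ v == c))
        = (PySem.Set.ofList (t.flatten.map κ)).map
          (fun c => t.flatten.filter (fun v => κ v == c)) := by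
      apply List.map_congr_left
      intro c' hc'
      have hc'2 : c' ∈ t.flatten.map κ := (PySem.Set.mem_ofList _ _).mp hc'
      obtain ⟨v, hv, rfl⟩ := List.mem_map.mp hc'2
      obtain ⟨h, hh, hvh⟩ := List.mem_flatten.mp hv
      rw [List.filter_append]
      have h1 : (g0 :: g').filter (fun w => κ w == κ v) = [] := by
        rw [List.filter_eq_nil_iff]
        intro a ha
        have := hrel h hh a ha v hvh
        simp
        omega
      rw [h1, List.nil_append]
    rw [hmapc]
    exact ih (fun h hh => hne h (by simp [hh])) (fun h hh => hconst h (by simp [hh])) hpw'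

lemma pvAltEq (positions : List Int) (M : Int) (p : Int) (rest : List Int)
    (hSc : PySem.List.sorted positions (fun x => x) false = p :: rest) :
    union_find_cluster_alt positions M = pvSplit M [p] rest := by
  unfold union_find_cluster_alt
  rw [hSc]
  simpa using pvBfold M rest [] [p] (by simp)

lemma pvFinal (positions : List Int) (M : Int) :
    union_find_cluster positions M = union_find_cluster_alt positions M := by
  by_cases hpos : positions = []
  · subst hpos; rfl
  · have hlen : ¬ positions.length = 0 := by simpa using hpos
    set S := PySem.List.sorted positions (fun x => x) false with hSdef
    have hSne : S ≠ [] := by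
      rw [hSdef, ne_eq, PySem.List.sorted_eq_nil_iff]
      exact hpos
    obtain ⟨p, rest, hSc⟩ := List.exists_cons_of_ne_nil hSne
    have hS : S.Pairwise (· ≤ ·) := PySem.List.sorted_pairwise positions (fun x => x) 
    have hfuel : ∀ x ∈ S, ((PySem.List.dedup S).filter (fun c => decide (x < c))).length < S.length :=
      fun x hx => pvFuelOk S x hx
    -- A side
    have hd0 : ∀ y, (S.foldl (fun d p => d.insert p p) PySem.Dict.empty).getD y y = y :=
      pvInit_getD S PySem.Dict.empty (fun y => by simp [PySem.Dict.getD_empty])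
    have hG0 := pvGood_init S M hd0
    obtain ⟨κ, hGf, _, hmerge⟩ := pvOuter_spec S M S.length hS hfuel S
      (S.foldl (fun d p => d.insert p p) PySem.Dict.empty) (fun x => x) hG0 ⟨[], rfl⟩
    have hA : union_find_cluster positions M
        = (S.foldl (fun c p => c.modify (κ p) [] (fun l => l ++ [p])) PySem.Dict.empty).values := by
      rw [union_find_cluster, if_neg hlen]
      show (S.foldl
        (fun (acc : PySem.Dict Int (List Int) × PySem.Dict Int Int) p =>
          let r := pvFind S.length acc.2 p
          (acc.1.modify r.2 [] (fun l => l ++ [p]), r.1))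
        (PySem.Dict.empty,
          pvOuter S.length M (S.foldl (fun d p => d.insert p p) PySem.Dict.empty) S)).1.values
        = _
      rw [pvCluster_fold S M κ S.length hfuel S PySem.Dict.empty
        (pvOuter S.length M (S.foldl (fun d p => d.insert p p) PySem.Dict.empty) S)
        hGf (fun x hx => hx)]
    set kf := S.foldl (fun c p => c.modify (κ p) [] (fun l => l ++ [p])) PySem.Dict.empty with hkf
    have hkeys : kf.keys = PySem.Set.ofList (S.map κ) := by
      rw [hkf, PySem.Dict.keys_foldl_modify_key]
      simp [PySem.Dict.keys_empty, PySem.Set.update_nil_left]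
    have hnodup : kf.keys.Nodup := by
      rw [hkf]
      exact PySem.Dict.nodup_keys_foldl_modify_key S κ [] _ PySem.Dict.empty
        (by simp)
    have hgetD : ∀ c, kf.getD c [] = S.filter (fun v => κ v == c) := by
      intro c
      have hmap : kf = (S.map (fun p => (κ p, p))).foldl
          (fun d pr => d.modify pr.1 [] (fun l => l ++ [pr.2])) PySem.Dict.empty := by
        rw [hkf, List.foldl_map]
      rw [hmap, PySem.Dict.getD_foldl_modify_append]
      rw [List.filter_map]
      simp [Function.comp_def]
    have hvals : kf.values = (PySem.Set.ofList (S.map κ)).map (fun c => S.filter (fun v => κ v == c)) := by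
      rw [PySem.Dict.values_eq_map_keys kf hnodup [], hkeys]
      exact List.map_congr_left (fun c hc => hgetD c)
    -- B side
    have hBval : union_find_cluster_alt positions M = pvSplit M [p] rest :=
      pvAltEq positions M p rest (by rw [← hSdef, hSc])
    obtain ⟨f1, f2, _, f3, f4⟩ := pvSplit_spec M rest [p] (by simp) (by have := hS; rw [hSc] at this; simpa using this)
      (by intro u1 a b w1 h; rcases u1 with _ | ⟨y, u1'⟩ <;> simp_all)
    have hflat : (pvSplit M [p] rest).flatten = S := by rw [f1]; simpa using hSc.symm
    have hadjκ : ∀ g ∈ pvSplit M [p] rest, ∀ u1 a b w1, g = u1 ++ a :: b :: w1 → κ a = κ b := by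
      intro g hg u1 a b w1 hgd
      obtain ⟨A, B, hAB⟩ := pvFlattenSplit (pvSplit M [p] rest) g hg
      have hdecomp : S = (A ++ u1) ++ a :: b :: (w1 ++ B) := by
        rw [← hflat, hAB, hgd]; simp [List.append_assoc]
      rcases f3 g hg u1 a b w1 hgd with heq | hle
      · rw [heq]
      · exact (hmerge a (b :: (w1 ++ B)) ⟨A ++ u1, by rw [hdecomp]⟩ b (by simp) (by omega)).symm
    have hconstG : ∀ g ∈ pvSplit M [p] rest, ∀ a ∈ g, ∀ b ∈ g, κ a = κ b := by
      intro g hg a ha b hb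
      obtain ⟨z, g2, rfl⟩ := List.exists_cons_of_ne_nil (f2 g hg)
      have h1 := pvConstOnGroup κ g2 z (fun u1 a' b' w1 h => hadjκ _ hg u1 a' b' w1 h) a ha
      have h2 := pvConstOnGroup κ g2 z (fun u1 a' b' w1 h => hadjκ _ hg u1 a' b' w1 h) b hb
      rw [h1, h2]
    have hchainR := pvChainR S M κ hS (fun x hx => (hGf.r1 x hx).2.1) hGf.r3
      (pvSplit M [p] rest) [] (by simpa using hflat) f4
    have hpwR := (@List.isChain_iff_pairwise _ _ (pvSplit M [p] rest)
      ⟨fun h1 h2 => ⟨h2.1, fun a ha b hb => by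
        obtain ⟨x, hx⟩ := h1.1
        exact lt_trans (h1.2 a ha x hx) (h2.2 x hx b hb)⟩⟩).mp hchainR
    have hpwLt : (pvSplit M [p] rest).Pairwise (fun g h => ∀ a ∈ g, ∀ b ∈ h, κ a < κ b) :=
      hpwR.imp (fun h => h.2)
    have hfib := pvFibers κ (pvSplit M [p] rest) f2 hconstG hpwLt
    rw [hflat] at hfib
    rw [hA, hvals, hfib, hBval]

-- ===== VERDICT (by name: the statement is the Claim_ definition above) =====
theorem union_find_cluster_spec : Claim_equal_union_find_cluster := by
  intro positions max_dist_bp _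
  show union_find_cluster positions max_dist_bp = union_find_cluster_alt positions max_dist_bp
  exact pvFinal positions max_dist_bp
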